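-- pv_equiv track=rewrite | github.com/abovavg/Coding_Log | 프로그래머스/0/181890. 왼쪽 오른쪽/왼쪽 오른쪽.py | solution
-- ===== SOURCE A (Python) =====
-- def solution(str_list):
--     answer = []
--     if 'l' in str_list and 'r' in str_list:
--
--         if str_list.index('l') < str_list.index('r'):
--             for i in range(str_list.index('l')):
--                 answer.append(str_list[i])
--         else:
--             for i in range(str_list.index('r')+1,len(str_list)):
--                 answer.append(str_list[i])
--     elif 'l' in str_list and 'r' not in str_list:
--         for i in range(str_list.index('l')):
--             answer.append(str_list[i])
--     elif 'l' not in str_list and 'r' in str_list: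
--         for i in range(str_list.index('r')+1,len(str_list)):
--             answer.append(str_list[i])
--     else:
--         answer = []
--     return answer
-- ===== SOURCE B (Python) =====
-- def solution(str_list):
--     # single pass: the first 'l'/'r' marker decides the answer
--     for i, s in enumerate(str_list):
--         if s == 'l':
--             return str_list[:i]
--         if s == 'r':
--             return str_list[i+1:]
--     return []
-- ===== Notes on version B (the rewrite author's own statement) =====
-- stated objective: simpler
-- what changed: A tests membership of 'l' and 'r' and calls .index repeatedly to pick one of four branch/loop cases; B makes a single structural scan that finds the first marker and returns the prefix before an 'l' or the tail after an 'r' directly.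
import Mathlib
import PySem

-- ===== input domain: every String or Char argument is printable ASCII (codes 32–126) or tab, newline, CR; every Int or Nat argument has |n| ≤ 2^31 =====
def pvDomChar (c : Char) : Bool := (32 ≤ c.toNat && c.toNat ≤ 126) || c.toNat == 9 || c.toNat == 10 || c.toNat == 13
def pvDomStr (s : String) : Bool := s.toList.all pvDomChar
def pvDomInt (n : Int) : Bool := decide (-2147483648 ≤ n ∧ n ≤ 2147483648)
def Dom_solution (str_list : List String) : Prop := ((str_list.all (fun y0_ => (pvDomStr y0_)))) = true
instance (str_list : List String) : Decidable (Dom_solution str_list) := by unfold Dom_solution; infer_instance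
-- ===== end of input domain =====

-- B replaces A's membership tests, repeated .index calls and index loops by a single
-- structural scan for the first 'l'/'r' marker (objective: simpler; no speed claim).

-- ===== PORT A =====
-- A's loops 'for i in range(...): answer.append(str_list[i])' are folds over pyRange
-- appending str_list[i] (pyGetD, always in range here); '.index' is index? (some inside
-- the membership guard, read with .getD 0).
def solution (str_list : List String) : List String :=
  let answer : List String := []
  if "l" ∈ str_list ∧ "r" ∈ str_list then
    if (((PySem.List.index? str_list "l").getD 0 : Nat) : Int)
        < (((PySem.List.index? str_list "r").getD 0 : Nat) : Int) then
      (PySem.List.pyRange 0 (((PySem.List.index? str_list "l").getD 0 : Nat) : Int) 1).foldl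
        (fun acc i => acc ++ [PySem.List.pyGetD str_list i ""]) answer
    else
      (PySem.List.pyRange ((((PySem.List.index? str_list "r").getD 0 : Nat) : Int) + 1)
          (PySem.List.len str_list) 1).foldl
        (fun acc i => acc ++ [PySem.List.pyGetD str_list i ""]) answer
  else if "l" ∈ str_list ∧ "r" ∉ str_list then
    (PySem.List.pyRange 0 (((PySem.List.index? str_list "l").getD 0 : Nat) : Int) 1).foldl
      (fun acc i => acc ++ [PySem.List.pyGetD str_list i ""]) answer
  else if "l" ∉ str_list ∧ "r" ∈ str_list then
    (PySem.List.pyRange ((((PySem.List.index? str_list "r").getD 0 : Nat) : Int) + 1)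
        (PySem.List.len str_list) 1).foldl
      (fun acc i => acc ++ [PySem.List.pyGetD str_list i ""]) answer
  else []

-- ===== PORT B =====
-- the 'for i, s in enumerate(str_list)' loop with early returns; slices are PySem.List.slice
def scanLR (orig : List String) : List (Int × String) → List String
  | [] => []
  | (i, s) :: rest =>
    if s = "l" then PySem.List.slice orig none (some i)
    else if s = "r" then PySem.List.slice orig (some (i + 1)) none
    else scanLR orig rest

def solution_alt (str_list : List String) : List String :=
  scanLR str_list (PySem.List.enumerate str_list 0)

-- ===== PRECONDITION & SPEC =====
def Spec_solution (str_list : List String) (out : List String) : Prop := out = solution_alt str_list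
instance (str_list : List String) (out : List String) : Decidable (Spec_solution str_list out) := by unfold Spec_solution; infer_instance

-- ===== CLAIM (what is proved, stated in full; the proofs are below) =====
def Claim_equal_solution : Prop := ∀ (str_list : List String), Dom_solution str_list → Spec_solution str_list (solution str_list)

-- ===== LEMMAS AND PROOFS =====

-- A's prefix loop builds str_list[:n]
lemma loop_take (xs : List String) (n : Nat) (h : n ≤ xs.length) :
    (PySem.List.pyRange 0 (n : Int) 1).foldl
      (fun acc i => acc ++ [PySem.List.pyGetD xs i ""]) [] = xs.take n := by
  rw [PySem.List.foldl_append_singleton_eq_map]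
  induction n with
  | zero => simp [PySem.List.pyRange_one_eq_nil]
  | succ k ih =>
    rw [show ((k+1 : Nat) : Int) = (k : Int) + 1 by push_cast; ring,
        PySem.List.pyRange_one_succ_right (by omega : (0:Int) ≤ (k:Nat)),
        List.map_append]
    have ih' := ih (by omega)
    simp only [List.nil_append] at ih' ⊢
    rw [ih', List.take_succ_eq_append_getElem (by omega : k < xs.length)]
    simp [PySem.List.pyGetD_natCast, List.getElem?_eq_getElem (by omega : k < xs.length)]

-- A's suffix loop builds str_list[n+1:]
lemma loop_drop (xs : List String) (n : Nat) :
    (PySem.List.pyRange ((n : Int) + 1) (PySem.List.len xs) 1).foldl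
      (fun acc i => acc ++ [PySem.List.pyGetD xs i ""]) [] = xs.drop (n + 1) := by
  rw [PySem.List.foldl_pyRange_pyGetD (xs:=xs) (d:="") (f:=fun (acc : List String) x => acc ++ [x]) (init:=([]:List String)) (a:=(n:Int)+1) (by positivity),
      show (((n:Int)+1)).toNat = n+1 by omega,
      PySem.List.foldl_append_singleton_eq_map (f := fun x => x)]
  simp

lemma scanLR_none (orig xs : List String) (k : Int) (hl : "l" ∉ xs) (hr : "r" ∉ xs) :
    scanLR orig (PySem.List.enumerate xs k) = [] := by
  induction xs generalizing k with
  | nil => rfl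
  | cons x t ih =>
    simp only [List.mem_cons, not_or] at hl hr
    rw [PySem.List.enumerate_cons]
    simp [scanLR, Ne.symm hl.1, Ne.symm hr.1, ih (k+1) hl.2 hr.2]

lemma scanLR_l (orig xs : List String) (k : Nat) (hl : "l" ∈ xs)
    (hlt : "r" ∉ xs ∨ xs.idxOf "l" < xs.idxOf "r") :
    scanLR orig (PySem.List.enumerate xs (k : Int)) = orig.take (k + xs.idxOf "l") := by
  induction xs generalizing k with
  | nil => cases hl
  | cons x t ih =>
    rw [PySem.List.enumerate_cons]
    by_cases hxl : x = "l"
    · subst hxl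
      simp only [scanLR, List.idxOf_cons_self,
        PySem.List.slice_to_natCast]
      simp
    · by_cases hxr : x = "r"
      · subst hxr
        rcases hlt with h | h
        · exact absurd (List.mem_cons_self) h
        · exfalso
          rw [List.idxOf_cons_self] at h
          rw [List.idxOf_cons_ne _ (by simp [hxl])] at h
          omega
      · have hl' : "l" ∈ t := (List.mem_cons.mp hl).resolve_left (fun h => hxl h.symm)
        have hlt' : "r" ∉ t ∨ t.idxOf "l" < t.idxOf "r" := by
          rcases hlt with h | h
          · exact Or.inl (fun hm => h (List.mem_cons_of_mem _ hm))
          · right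
            rw [List.idxOf_cons_ne _ (by simp [hxl]), List.idxOf_cons_ne _ (by simp [hxr])] at h
            omega
        have hcast : (k : Int) + 1 = ((k + 1 : Nat) : Int) := by push_cast; ring
        simp only [scanLR, if_neg hxl, if_neg hxr, hcast, ih (k+1) hl' hlt',
          List.idxOf_cons_ne _ (by simp [hxl] : x ≠ "l")]
        congr 1
        omega

lemma scanLR_r (orig xs : List String) (k : Nat) (hr : "r" ∈ xs)
    (hlt : "l" ∉ xs ∨ xs.idxOf "r" < xs.idxOf "l") :
    scanLR orig (PySem.List.enumerate xs (k : Int)) = orig.drop (k + xs.idxOf "r" + 1) := by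
  induction xs generalizing k with
  | nil => cases hr
  | cons x t ih =>
    rw [PySem.List.enumerate_cons]
    by_cases hxl : x = "l"
    · subst hxl
      rcases hlt with h | h
      · exact absurd (List.mem_cons_self) h
      · exfalso
        rw [List.idxOf_cons_self] at h
        rw [List.idxOf_cons_ne _ (by simp)] at h
        omega
    · by_cases hxr : x = "r"
      · subst hxr
        have hcast : (k : Int) + 1 = ((k + 1 : Nat) : Int) := by push_cast; ring
        simp only [scanLR, if_neg (by decide : ¬("r":String) = "l"),
          List.idxOf_cons_self, hcast,
          PySem.List.slice_from_natCast]
        congr 1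
      · have hr' : "r" ∈ t := (List.mem_cons.mp hr).resolve_left (fun h => hxr h.symm)
        have hlt' : "l" ∉ t ∨ t.idxOf "r" < t.idxOf "l" := by
          rcases hlt with h | h
          · exact Or.inl (fun hm => h (List.mem_cons_of_mem _ hm))
          · right
            rw [List.idxOf_cons_ne _ (by simp [hxr]), List.idxOf_cons_ne _ (by simp [hxl])] at h
            omega
        have hcast : (k : Int) + 1 = ((k + 1 : Nat) : Int) := by push_cast; ring
        simp only [scanLR, if_neg hxl, if_neg hxr, hcast, ih (k+1) hr' hlt',
          List.idxOf_cons_ne _ (by simp [hxr] : x ≠ "r")]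
        congr 1
        omega

-- reading A's '.index' inside a membership guard
lemma idxOf?_eq_some (xs : List String) (v : String) (h : v ∈ xs) :
    List.idxOf? v xs = some (List.idxOf v xs) := by
  induction xs with
  | nil => cases h
  | cons x t ih =>
    by_cases hx : x = v
    · subst hx; simp [List.idxOf?_cons, List.idxOf_cons_self]
    · have hv : v ∈ t := (List.mem_cons.mp h).resolve_left (fun hh => hx hh.symm)
      simp [List.idxOf?_cons, List.idxOf_cons_ne, hx, ih hv]

lemma index_getD (xs : List String) (v : String) (h : v ∈ xs) :
    ((PySem.List.index? xs v).getD 0) = xs.idxOf v := by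
  rw [PySem.List.index?_eq_idxOf?, idxOf?_eq_some xs v h]
  rfl

-- if both markers occur, their indices differ
lemma idxOf_ne (xs : List String) (hl : "l" ∈ xs) (hr : "r" ∈ xs) :
    xs.idxOf "l" ≠ xs.idxOf "r" := by
  intro h
  have h1 : xs[xs.idxOf "l"]? = some "l" :=
    (List.getElem?_eq_getElem _).trans (by rw [List.getElem_idxOf (List.idxOf_lt_length_of_mem hl)])
  have h2 : xs[xs.idxOf "r"]? = some "r" :=
    (List.getElem?_eq_getElem _).trans (by rw [List.getElem_idxOf (List.idxOf_lt_length_of_mem hr)])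
  rw [h, h2] at h1
  exact absurd (Option.some.inj h1) (by decide)

-- ===== VERDICT (by name: the statement is the Claim_ definition above) =====
theorem solution_spec : Claim_equal_solution := by
  intro xs _
  unfold Spec_solution solution solution_alt
  have h0 : (0:Int) = ((0:Nat):Int) := by simp
  by_cases hl : "l" ∈ xs <;> by_cases hr : "r" ∈ xs
  · -- both markers
    simp only [if_pos (And.intro hl hr), index_getD xs "l" hl, index_getD xs "r" hr]
    by_cases hord : xs.idxOf "l" < xs.idxOf "r"
    · rw [if_pos (by exact_mod_cast hord),
          loop_take xs _ (le_of_lt (List.idxOf_lt_length_of_mem hl)),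
          h0, scanLR_l xs xs 0 hl (Or.inr hord)]
      simp
    · have hord' : xs.idxOf "r" < xs.idxOf "l" := by
        have := idxOf_ne xs hl hr; omega
      rw [if_neg (by exact_mod_cast hord), loop_drop xs _,
          h0, scanLR_r xs xs 0 hr (Or.inr hord')]
      simp
  · -- only 'l'
    rw [if_neg (by tauto), if_pos (And.intro hl hr), index_getD xs "l" hl,
        loop_take xs _ (le_of_lt (List.idxOf_lt_length_of_mem hl)),
        h0, scanLR_l xs xs 0 hl (Or.inl hr)]
    simp
  · -- only 'r'
    rw [if_neg (by tauto), if_neg (by tauto), if_pos (And.intro hl hr), index_getD xs "r" hr,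
        loop_drop xs _, h0, scanLR_r xs xs 0 hr (Or.inl hl)]
    simp
  · -- neither
    rw [if_neg (by tauto), if_neg (by tauto), if_neg (by tauto), scanLR_none xs xs 0 hl hr]
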